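-- pv_equiv track=rewrite | github.com/bcrowell/election | election.py | vote_margin_to_predictit_bin
-- ===== SOURCE A (Python) =====
-- def electoral_college_size():
--   return 538
--
-- def predictit_bins():
--   return [0, 10, 30, 60, 100, 150, 210, 280] # special casing for 0
--
-- def vote_margin_to_predictit_bin(x):
--   """
--   returns (bin number,low,high)
--   bin numbers for R go from 0 to neg values, for D from 1 to higher pos values
--   """
--   bins = predictit_bins()
--   if x==0:
--     return (0,-(bins[1]-1),0) # 0 is counted the same as a win for R in 2020
--   if x<0:
--     a = vote_margin_to_predictit_bin(-x)
--     return (n_predictit_bins()-a[0]-1,-a[1],-a[2])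
--   for i in range(len(bins)-1):
--     if x>=bins[i] and x<bins[i+1]:
--       return (int(n_predictit_bins()/2)+i,bins[i],bins[i+1]-1)
--   return (n_predictit_bins()-1,bins[len(bins)-1],electoral_college_size())
--
-- def n_predictit_bins():
--   return 16
-- ===== SOURCE B (Python) =====
-- # Simpler: table lookup over a precomputed list of (low, high) ranges indexed by
-- # the count of range starts <= |x|, instead of a scan plus a recursive mirror.
-- _RANGES = [(0, 9), (10, 29), (30, 59), (60, 99), (100, 149), (150, 209), (210, 279), (280, 538)]
--
-- def vote_margin_to_predictit_bin(x):
--   if x == 0: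
--     return (0, -9, 0)
--   y = -x if x < 0 else x
--   i = sum(1 for lo, hi in _RANGES if lo <= y) - 1
--   lo, hi = _RANGES[i]
--   if x > 0:
--     return (8 + i, lo, hi)
--   return (7 - i, -lo, -hi)
-- ===== Notes on version B (the rewrite author's own statement) =====
-- stated objective: simpler
-- what changed: Replaces A's positive-side linear scan plus recursive negative-side mirroring with a single precomputed (low,high) range table indexed by counting range starts <= |x|, handling the sign by one arithmetic reflection.
import Mathlib
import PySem

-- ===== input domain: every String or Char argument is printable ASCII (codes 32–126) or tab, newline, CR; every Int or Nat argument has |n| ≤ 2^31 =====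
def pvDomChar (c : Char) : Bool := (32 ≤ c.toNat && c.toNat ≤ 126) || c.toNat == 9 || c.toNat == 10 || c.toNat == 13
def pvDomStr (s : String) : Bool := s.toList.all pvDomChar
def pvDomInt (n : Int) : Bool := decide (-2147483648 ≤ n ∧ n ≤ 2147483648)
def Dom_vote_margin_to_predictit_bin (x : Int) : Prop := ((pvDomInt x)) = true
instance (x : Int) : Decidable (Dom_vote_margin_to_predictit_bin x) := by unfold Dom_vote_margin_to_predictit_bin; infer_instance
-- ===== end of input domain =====

-- B replaces A's positive-side scan plus recursive negative-side mirror by one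
-- precomputed (low, high) table indexed via a count of range starts ≤ |x| (simpler).

-- ===== PORT A =====
def pvBins : List Int := [0, 10, 30, 60, 100, 150, 210, 280]

-- the body of A's `for i in range(len(bins)-1)` loop with its early return
def pvScanA (x : Int) : List Int → Option (Int × Int × Int)
  | [] => none
  | i :: rest =>
    if PySem.List.pyGetD pvBins i 0 ≤ x ∧ x < PySem.List.pyGetD pvBins (i + 1) 0 then
      some (8 + i, PySem.List.pyGetD pvBins i 0, PySem.List.pyGetD pvBins (i + 1) 0 - 1)
    else pvScanA x rest

def vote_margin_to_predictit_bin (x : Int) : Int × Int × Int :=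
  if x = 0 then (0, -(PySem.List.pyGetD pvBins 1 0 - 1), 0)
  else if x < 0 then
    let a := vote_margin_to_predictit_bin (-x)
    (16 - a.1 - 1, -a.2.1, -a.2.2)
  else
    match pvScanA x (PySem.List.pyRange 0 7 1) with
    | some r => r
    | none => (16 - 1, PySem.List.pyGetD pvBins 7 0, 538)
termination_by (if x < 0 then 1 else 0 : Nat)
decreasing_by simp_all; omega

-- ===== PORT B =====
def pvRanges : List (Int × Int) :=
  [(0, 9), (10, 29), (30, 59), (60, 99), (100, 149), (150, 209), (210, 279), (280, 538)]

def vote_margin_to_predictit_bin_alt (x : Int) : Int × Int × Int :=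
  if x = 0 then (0, -9, 0)
  else
    let y := if x < 0 then -x else x
    let i : Int := ((pvRanges.countP (fun p => decide (p.1 ≤ y)) : Nat) : Int) - 1
    let p := PySem.List.pyGetD pvRanges i (0, 0)
    if x > 0 then (8 + i, p.1, p.2)
    else (7 - i, -p.1, -p.2)

-- ===== PRECONDITION & SPEC =====
def Spec_vote_margin_to_predictit_bin (x : Int) (out : Int × Int × Int) : Prop := out = vote_margin_to_predictit_bin_alt x
instance (x : Int) (out : Int × Int × Int) : Decidable (Spec_vote_margin_to_predictit_bin x out) := by unfold Spec_vote_margin_to_predictit_bin; infer_instance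

-- ===== CLAIM (what is proved, stated in full; the proofs are below) =====
def Claim_equal_vote_margin_to_predictit_bin : Prop := ∀ (x : Int), Dom_vote_margin_to_predictit_bin x → Spec_vote_margin_to_predictit_bin x (vote_margin_to_predictit_bin x)

-- ===== LEMMAS AND PROOFS =====

lemma count_eq (x : Int) : pvRanges.countP (fun p => decide (p.1 ≤ x)) =
    (if 280 ≤ x then 8 else if 210 ≤ x then 7 else if 150 ≤ x then 6 else if 100 ≤ x then 5
     else if 60 ≤ x then 4 else if 30 ≤ x then 3 else if 10 ≤ x then 2 else if 0 ≤ x then 1 else 0) := by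
  simp only [pvRanges, List.countP_cons, List.countP_nil, decide_eq_true_eq]
  split_ifs <;> omega

lemma range_eval : PySem.List.pyRange 0 7 1 = [0,1,2,3,4,5,6] := by decide

set_option maxHeartbeats 2000000 in
lemma pos_eq (x : Int) (hx : 0 < x) : vote_margin_to_predictit_bin x = vote_margin_to_predictit_bin_alt x := by
  rw [vote_margin_to_predictit_bin, range_eval]
  rw [if_neg (by omega : ¬ x = 0), if_neg (by omega : ¬ x < 0)]
  rw [vote_margin_to_predictit_bin_alt, if_neg (by omega : ¬ x = 0)]
  simp only [if_neg (by omega : ¬ x < 0), if_pos hx, count_eq]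
  simp only [pvScanA,
    show PySem.List.pyGetD pvBins 0 0 = 0 from by decide,
    show PySem.List.pyGetD pvBins (0+1) 0 = 10 from by decide,
    show PySem.List.pyGetD pvBins 1 0 = 10 from by decide,
    show PySem.List.pyGetD pvBins (1+1) 0 = 30 from by decide,
    show PySem.List.pyGetD pvBins 2 0 = 30 from by decide,
    show PySem.List.pyGetD pvBins (2+1) 0 = 60 from by decide,
    show PySem.List.pyGetD pvBins 3 0 = 60 from by decide,
    show PySem.List.pyGetD pvBins (3+1) 0 = 100 from by decide,
    show PySem.List.pyGetD pvBins 4 0 = 100 from by decide,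
    show PySem.List.pyGetD pvBins (4+1) 0 = 150 from by decide,
    show PySem.List.pyGetD pvBins 5 0 = 150 from by decide,
    show PySem.List.pyGetD pvBins (5+1) 0 = 210 from by decide,
    show PySem.List.pyGetD pvBins 6 0 = 210 from by decide,
    show PySem.List.pyGetD pvBins (6+1) 0 = 280 from by decide,
    show PySem.List.pyGetD pvBins 7 0 = 280 from by decide]
  split_ifs <;> first | rfl | (exfalso; omega)

lemma mirror_eq (x : Int) (hx : x < 0) :
    (16 - (vote_margin_to_predictit_bin_alt (-x)).1 - 1,
     -(vote_margin_to_predictit_bin_alt (-x)).2.1,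
     -(vote_margin_to_predictit_bin_alt (-x)).2.2) = vote_margin_to_predictit_bin_alt x := by
  rw [vote_margin_to_predictit_bin_alt, vote_margin_to_predictit_bin_alt]
  rw [if_neg (by omega : ¬ -x = 0), if_neg (by omega : ¬ x = 0)]
  simp only [if_neg (by omega : ¬ -x < 0), if_pos hx, if_pos (by omega : -x > 0),
    if_neg (by omega : ¬ x > 0), Prod.mk.injEq]
  exact ⟨by omega, trivial⟩

-- ===== VERDICT (by name: the statement is the Claim_ definition above) =====
theorem vote_margin_to_predictit_bin_spec : Claim_equal_vote_margin_to_predictit_bin := by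
  intro x _
  unfold Spec_vote_margin_to_predictit_bin
  rcases lt_trichotomy x 0 with h | h | h
  · rw [vote_margin_to_predictit_bin, if_neg (by omega : ¬ x = 0), if_pos h]
    rw [pos_eq (-x) (by omega)]
    exact mirror_eq x h
  · subst h
    rw [vote_margin_to_predictit_bin]
    norm_num [vote_margin_to_predictit_bin_alt,
      show PySem.List.pyGetD pvBins 1 0 = 10 from by decide]
  · exact pos_eq x h
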